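-- pv_equiv track=rewrite | github.com/AleksanderKarn/DZ_Po_OOP | дз_тестовые_задания.py | create_pyramid_not_even
-- ===== SOURCE A (Python) =====
-- def create_pyramid_not_even(list_not_even):
--     """
--     Создает словарь на подобии пирамиды с нечетными
--      значениями где ключ это номер этажа а значение
--      это список элементво на этом этаже
--     :param list_not_even: список элементов пирамиды с нечетным значением
--     :return: словарь имитирующий поведение пирамиды нечетных значений
--     """
--     pyramid_not_even_number = {}
--     list_not_even_ = list_not_even
--     for i in range(len(list_not_even)):
--         if list_not_even_ != []:
--             pyramid_not_even_number[i + 1] = list_not_even_[:i + 1]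
--             list_not_even_ = list_not_even_[i + 1:]
--     return pyramid_not_even_number
-- ===== SOURCE B (Python) =====
-- def create_pyramid_not_even(list_not_even):
--     """Closed-form rebuild: find the number of floors m (smallest m with
--     m*(m+1)//2 >= n), then slice the original list at triangular offsets."""
--     n = len(list_not_even)
--     m = 0
--     while m * (m + 1) // 2 < n:
--         m += 1
--     return {k: list_not_even[(k - 1) * k // 2 : k * (k + 1) // 2]
--             for k in range(1, m + 1)}
-- ===== Notes on version B (the rewrite author's own statement) =====
-- stated objective: faster
-- what changed: Replaces A's shrinking-remainder loop (which re-slices the remaining list on every floor) by computing the floor count m from the triangular-number inequality and building the dict in one comprehension that slices the original list at closed-form triangular offsets.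
import Mathlib
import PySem

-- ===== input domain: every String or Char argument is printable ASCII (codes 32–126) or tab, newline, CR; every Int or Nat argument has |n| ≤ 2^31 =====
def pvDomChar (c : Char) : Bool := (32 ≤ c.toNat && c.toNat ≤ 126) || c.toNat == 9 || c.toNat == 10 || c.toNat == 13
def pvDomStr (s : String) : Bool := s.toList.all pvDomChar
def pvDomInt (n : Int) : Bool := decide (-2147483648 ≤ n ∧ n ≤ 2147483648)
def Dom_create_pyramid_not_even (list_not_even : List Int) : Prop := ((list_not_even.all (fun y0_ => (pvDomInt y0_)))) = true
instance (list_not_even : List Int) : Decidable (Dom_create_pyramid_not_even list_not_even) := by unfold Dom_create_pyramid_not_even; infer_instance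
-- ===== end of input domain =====

-- B computes the pyramid from closed-form triangular offsets instead of A's shrinking remainder (which re-slices the remaining list each floor); measured faster in a timing run.

-- ===== PORT A =====
-- for i in range(len(xs)): if rest != []: d[i+1] = rest[:i+1]; rest = rest[i+1:]
-- (keys i+1 are pairwise distinct, so each dict assignment appends a fresh entry)
def create_pyramid_not_even (list_not_even : List Int) : List (Int × List Int) :=
  ((PySem.List.pyRange 0 (list_not_even.length : Int) 1).foldl
    (fun (st : List (Int × List Int) × List Int) i =>
      if st.2 ≠ [] then
        (st.1 ++ [(i + 1, PySem.List.slice st.2 none (some (i + 1)))],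
         PySem.List.slice st.2 (some (i + 1)) none)
      else st)
    ([], list_not_even)).1

-- ===== PORT B =====
-- m = 0; while m*(m+1)//2 < n: m += 1   (terminates within n steps since n*(n+1)/2 ≥ n;
-- ported with fuel n, which is always enough — see pvFloorCount_spec below)
def pvFloorCount (n : Nat) : Nat → Nat → Nat
  | 0, m => m
  | fuel + 1, m => if m * (m + 1) / 2 < n then pvFloorCount n fuel (m + 1) else m

-- {k: xs[(k-1)*k//2 : k*(k+1)//2] for k in range(1, m+1)}  (keys distinct ⇒ assoc list in order)
def create_pyramid_not_even_alt (list_not_even : List Int) : List (Int × List Int) :=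
  let n := list_not_even.length
  let m := pvFloorCount n n 0
  (PySem.List.pyRange 1 ((m : Int) + 1) 1).map (fun k =>
    (k, PySem.List.slice list_not_even
          (some (PySem.Int.floordiv ((k - 1) * k) 2))
          (some (PySem.Int.floordiv (k * (k + 1)) 2))))

-- ===== PRECONDITION & SPEC =====
def Spec_create_pyramid_not_even (list_not_even : List Int) (out : List (Int × List Int)) : Prop := out = create_pyramid_not_even_alt list_not_even
instance (list_not_even : List Int) (out : List (Int × List Int)) : Decidable (Spec_create_pyramid_not_even list_not_even out) := by unfold Spec_create_pyramid_not_even; infer_instance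

-- ===== CLAIM (what is proved, stated in full; the proofs are below) =====
def Claim_equal_create_pyramid_not_even : Prop := ∀ (list_not_even : List Int), Dom_create_pyramid_not_even list_not_even → Spec_create_pyramid_not_even list_not_even (create_pyramid_not_even list_not_even)

-- ===== LEMMAS AND PROOFS =====

-- canonical form both ports are reduced to: floor a+1 takes the next a+1 elements
def pvPyr : Nat → Nat → List Int → List (Int × List Int)
  | 0, _, _ => []
  | c + 1, a, rest =>
    if rest = [] then []
    else ((a : Int) + 1, rest.take (a + 1)) :: pvPyr c (a + 1) (rest.drop (a + 1))

theorem pvPyr_nil (c a : Nat) : pvPyr c a [] = [] := by cases c <;> simp [pvPyr]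

def pvT (j : Nat) : Nat := j * (j + 1) / 2

theorem pvT_succ (j : Nat) : pvT (j + 1) = pvT j + (j + 1) := by
  unfold pvT
  have : (j + 1) * (j + 2) = j * (j + 1) + (j + 1) * 2 := by ring
  rw [show j + 1 + 1 = j + 2 from rfl, this, Nat.add_mul_div_right _ _ (by omega : 0 < 2)]

theorem pvT_ge_self (j : Nat) : j ≤ pvT j := by
  unfold pvT
  rw [Nat.le_div_iff_mul_le (by omega : 0 < 2)]
  cases j with
  | zero => simp
  | succ k => exact Nat.mul_le_mul (le_refl _) (by omega)

theorem pvFloorCount_spec (n : Nat) : ∀ (fuel m : Nat), n ≤ pvT m + fuel →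
    m ≤ pvFloorCount n fuel m ∧ n ≤ pvT (pvFloorCount n fuel m) ∧
    ∀ j, m ≤ j → j < pvFloorCount n fuel m → pvT j < n := by
  intro fuel
  induction fuel with
  | zero =>
    intro m h
    simp only [pvFloorCount]
    exact ⟨le_refl _, by omega, fun j h1 h2 => by omega⟩
  | succ fuel ih =>
    intro m h
    by_cases hlt : m * (m + 1) / 2 < n
    · have hlt' : pvT m < n := hlt
      have := ih (m + 1) (by have := pvT_succ m; omega)
      simp only [pvFloorCount, if_pos hlt]
      refine ⟨by omega, this.2.1, ?_⟩
      intro j hj1 hj2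
      rcases Nat.eq_or_lt_of_le hj1 with rfl | hj1'
      · exact hlt'
      · exact this.2.2 j (by omega) hj2
    · simp only [pvFloorCount, if_neg hlt]
      exact ⟨le_refl _, by unfold pvT; omega, by omega⟩

-- A's fold with empty remainder is the identity
theorem pvFoldA_nil (l : List Int) (acc : List (Int × List Int)) :
    (l.foldl (fun (st : List (Int × List Int) × List Int) i =>
      if st.2 ≠ [] then
        (st.1 ++ [(i + 1, PySem.List.slice st.2 none (some (i + 1)))],
         PySem.List.slice st.2 (some (i + 1)) none)
      else st) (acc, [])) = (acc, []) := by
  induction l generalizing acc with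
  | nil => rfl
  | cons x l ih => simpa [List.foldl_cons] using ih acc

theorem pvFoldA (c : Nat) : ∀ (a : Nat) (acc : List (Int × List Int)) (rest : List Int),
    (((PySem.List.pyRange (a : Int) ((a : Int) + (c : Int)) 1).foldl
      (fun (st : List (Int × List Int) × List Int) i =>
        if st.2 ≠ [] then
          (st.1 ++ [(i + 1, PySem.List.slice st.2 none (some (i + 1)))],
           PySem.List.slice st.2 (some (i + 1)) none)
        else st) (acc, rest)).1) = acc ++ pvPyr c a rest := by
  induction c with
  | zero =>
    intro a acc rest
    rw [PySem.List.pyRange_one_eq_nil (by omega)]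
    simp [pvPyr]
  | succ c ih =>
    intro a acc rest
    rw [PySem.List.pyRange_one_cons (by push_cast; omega)]
    rcases rest with _ | ⟨x, rest'⟩
    · rw [pvPyr_nil]
      simp only [List.foldl_cons]
      rw [if_neg (by simp)]
      have := pvFoldA_nil (PySem.List.pyRange ((a : Int) + 1) ((a : Int) + (c + 1 : Nat)) 1) acc
      rw [this]
      simp
    · simp only [List.foldl_cons]
      rw [if_pos (by simp)]
      have h1 : PySem.List.slice (x :: rest') none (some ((a : Int) + 1)) = (x :: rest').take (a + 1) := by
        rw [show ((a : Int) + 1) = ((a + 1 : Nat) : Int) by push_cast; ring,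
          PySem.List.slice_to_natCast]
      have h2 : PySem.List.slice (x :: rest') (some ((a : Int) + 1)) none = (x :: rest').drop (a + 1) := by
        rw [show ((a : Int) + 1) = ((a + 1 : Nat) : Int) by push_cast; ring,
          PySem.List.slice_from_natCast]
      rw [h1, h2]
      have hr : ((a : Int) + 1) = ((a + 1 : Nat) : Int) := by push_cast; ring
      have hb : ((a : Int) + ((c + 1 : Nat) : Int)) = ((a + 1 : Nat) : Int) + (c : Int) := by
        push_cast; ring
      rw [hb, hr, ih (a + 1) (acc ++ [(((a + 1 : Nat) : Int), (x :: rest').take (a + 1))]) ((x :: rest').drop (a + 1))]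
      simp [pvPyr]

theorem pvMapB (xs : List Int) (m : Nat) (hTm : xs.length ≤ pvT m)
    (hmin : ∀ j, j < m → pvT j < xs.length) (hmn : m ≤ xs.length) :
    ∀ (d : Nat) (j : Nat), j = m - d → d ≤ m →
    ((PySem.List.pyRange ((j : Int) + 1) ((m : Int) + 1) 1).map (fun k =>
      (k, PySem.List.slice xs
            (some (PySem.Int.floordiv ((k - 1) * k) 2))
            (some (PySem.Int.floordiv (k * (k + 1)) 2))))) =
    pvPyr (xs.length - j) j (xs.drop (pvT j)) := by
  intro d
  induction d with
  | zero =>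
    intro j hj _
    subst hj
    rw [PySem.List.pyRange_one_eq_nil (by omega)]
    rw [List.drop_eq_nil_of_le (by simpa using hTm), pvPyr_nil]
    rfl
  | succ d ih =>
    intro j hj hd
    have hjm : j < m := by omega
    have hTj : pvT j < xs.length := hmin j hjm
    rw [PySem.List.pyRange_one_cons (by omega)]
    rw [List.map_cons]
    have e1 : ((j : Int) + 1 - 1) * ((j : Int) + 1) = ((pvT j * 2 : Nat) : Int) := by
      unfold pvT
      push_cast [Nat.div_mul_cancel (by
        rcases Nat.even_mul_succ_self j with h
        exact h.two_dvd : 2 ∣ j * (j + 1))]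
      ring
    have e2 : ((j : Int) + 1) * ((j : Int) + 1 + 1) = ((pvT (j + 1) * 2 : Nat) : Int) := by
      unfold pvT
      push_cast [Nat.div_mul_cancel (by
        rcases Nat.even_mul_succ_self (j + 1) with h
        exact h.two_dvd : 2 ∣ (j + 1) * (j + 1 + 1))]
      ring
    have f1 : PySem.Int.floordiv (((j : Int) + 1 - 1) * ((j : Int) + 1)) 2 = ((pvT j : Nat) : Int) := by
      rw [e1, show ((2:Int)) = ((2:Nat):Int) from rfl, PySem.Int.floordiv_natCast]
      simp
    have f2 : PySem.Int.floordiv (((j : Int) + 1) * ((j : Int) + 1 + 1)) 2 = ((pvT (j + 1) : Nat) : Int) := by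
      rw [e2, show ((2:Int)) = ((2:Nat):Int) from rfl, PySem.Int.floordiv_natCast]
      simp
    have hTs : pvT (j + 1) - pvT j = j + 1 := by rw [pvT_succ]; omega
    have hrest : xs.drop (pvT j) ≠ [] := by
      intro h
      have := List.drop_eq_nil_iff.mp h
      omega
    have hfuel : xs.length - j = (xs.length - (j + 1)) + 1 := by omega
    rw [f1, f2, PySem.List.slice_natCast, hTs, hfuel]
    simp only [pvPyr, if_neg hrest]
    congr 1
    have hcast : ((j : Int) + 1 + 1) = (((j + 1 : Nat) : Int) + 1) := by push_cast; ring
    rw [hcast, ih (j + 1) (by omega) (by omega), List.drop_drop, pvT_succ]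

-- ===== VERDICT (by name: the statement is the Claim_ definition above) =====
theorem create_pyramid_not_even_spec : Claim_equal_create_pyramid_not_even := by
  intro xs _
  unfold Spec_create_pyramid_not_even create_pyramid_not_even create_pyramid_not_even_alt
  set n := xs.length with hn
  have hA := pvFoldA n 0 [] xs
  simp only [Nat.cast_zero, zero_add] at hA
  rw [hA]
  have hspec := pvFloorCount_spec n n 0 (by simp)
  set m := pvFloorCount n n 0 with hm
  have hmn : m ≤ n := by
    by_contra h
    have := hspec.2.2 n (by omega) (by omega)
    have := pvT_ge_self n
    omega
  have hB := pvMapB xs m (hspec.2.1) (fun j hj => hspec.2.2 j (by omega) hj) hmn m 0 (by omega) (le_refl m)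
  simp only [Nat.cast_zero, zero_add, Nat.sub_zero] at hB
  rw [← hn] at hB
  rw [hB]
  simp [pvT]
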